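-- pv_equiv track=rewrite | github.com/TheAryamanC/project_euler | problem064.py | get_continued_fraction_period
-- ===== SOURCE A (Python) =====
-- import math
--
-- def get_continued_fraction_period(n):
--     sqrt_n = int(math.sqrt(n))
--     if sqrt_n * sqrt_n == n:
--         return 0
--
--     m, d, a = 0, 1, sqrt_n
--     seen = {}
--     period = 0
--
--     while True:
--         m = d * a - m
--         d = (n - m * m) // d
--         a = (sqrt_n + m) // d
--
--         state = (m, d)
--         if state in seen:
--             return period
--         seen[state] = period
--         period += 1
-- ===== SOURCE B (Python) =====
-- import math
--
-- def get_continued_fraction_period(n):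
--     # No `seen` dict and no partial-quotient variable: iterate only the state
--     # (m, d) with a mod-based update (m' = a0 - (a0+m) % d), counting steps,
--     # and stop when the state first returns to (a0, 1) -- the standard
--     # end-of-period state of sqrt(n)'s continued fraction.
--     a0 = math.isqrt(n)
--     if a0 * a0 == n:
--         return 0
--     m, d, period = 0, 1, 0
--     while (m, d) != (a0, 1):
--         m = a0 - (a0 + m) % d
--         d = (n - m * m) // d
--         period += 1
--     return period
-- ===== Notes on version B (the rewrite author's own statement) =====
-- stated objective: simpler
-- what changed: Drops A's `seen` dict and the partial-quotient variable `a` entirely: B iterates only the state (m,d) with a mod-based update m' = a0 - (a0+m) % d and stops when the state first returns to (a0,1), the standard end-of-period state of sqrt(n)'s continued fraction.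
import Mathlib
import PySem

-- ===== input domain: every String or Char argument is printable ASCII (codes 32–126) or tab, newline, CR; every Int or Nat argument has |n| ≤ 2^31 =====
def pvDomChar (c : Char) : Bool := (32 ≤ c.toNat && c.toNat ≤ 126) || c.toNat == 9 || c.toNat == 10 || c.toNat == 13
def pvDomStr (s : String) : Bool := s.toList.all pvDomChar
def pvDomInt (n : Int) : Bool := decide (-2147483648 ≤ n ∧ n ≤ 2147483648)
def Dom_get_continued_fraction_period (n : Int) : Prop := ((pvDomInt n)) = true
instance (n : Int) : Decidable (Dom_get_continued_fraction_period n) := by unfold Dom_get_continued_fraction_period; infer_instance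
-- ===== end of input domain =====

-- B drops A's `seen` dict and the partial-quotient variable: it iterates only the
-- state (m, d) with a mod-based update and stops when the state returns to (a0, 1)
-- (objective: simpler, O(1) memory).

-- ===== PORT A =====
-- helper for port A: the `while True` loop (fuel only totalizes it; it is never
-- exhausted on 0 <= n: the loop stops at the first repeated state, and there are
-- fewer than (n+2)^2 states)
def pvGoA (n a0 : Int) : Nat → Int → Int → Int → PySem.Dict (Int × Int) Int → Int → Int
  | 0, _, _, _, _, _ => 0
  | fuel+1, m, d, a, seen, period =>
    let m1 := d * a - m
    let d1 := PySem.Int.floordiv (n - m1 * m1) d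
    let a1 := PySem.Int.floordiv (a0 + m1) d1
    if seen.contains (m1, d1) then period
    else pvGoA n a0 fuel m1 d1 a1 (seen.insert (m1, d1) period) (period + 1)


def get_continued_fraction_period (n : Int) : Int :=
  -- int(math.sqrt(n)) equals isqrt n on the whole domain 0 ≤ n ≤ 2^31
  let sqrt_n := Int.sqrt n
  if sqrt_n * sqrt_n = n then 0
  else pvGoA n sqrt_n ((n.toNat + 2) * (n.toNat + 2) + 1) 0 1 sqrt_n PySem.Dict.empty 0

-- ===== PORT B =====
-- helper for port B: the `while (m, d) != (a0, 1)` loop; the condition is checked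
-- before fuel is consumed (fuel only totalizes the loop)
def pvGoB (n a0 : Int) (fuel : Nat) (m d period : Int) : Int :=
  if m = a0 ∧ d = 1 then period
  else
    match fuel with
    | 0 => 0
    | fuel + 1 =>
      let m1 := a0 - PySem.Int.mod (a0 + m) d
      pvGoB n a0 fuel m1 (PySem.Int.floordiv (n - m1 * m1) d) (period + 1)


def get_continued_fraction_period_alt (n : Int) : Int :=
  let a0 := Int.sqrt n
  if a0 * a0 = n then 0
  else pvGoB n a0 ((n.toNat + 2) * (n.toNat + 2)) 0 1 0

-- ===== PRECONDITION & SPEC =====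
-- Pre_ excludes exactly n < 0, where A raises ValueError (math.sqrt of a negative number).
def Pre_get_continued_fraction_period (n : Int) : Prop := 0 ≤ n
instance (n : Int) : Decidable (Pre_get_continued_fraction_period n) := by unfold Pre_get_continued_fraction_period; infer_instance
def pvWitness_get_continued_fraction_period : Int := 7

def Spec_get_continued_fraction_period (n : Int) (out : Int) : Prop := out = get_continued_fraction_period_alt n
instance (n : Int) (out : Int) : Decidable (Spec_get_continued_fraction_period n out) := by unfold Spec_get_continued_fraction_period; infer_instance

-- ===== CLAIM (what is proved, stated in full; the proofs are below) =====
def Claim_equal_get_continued_fraction_period : Prop := ∀ (n : Int), Dom_get_continued_fraction_period n → Pre_get_continued_fraction_period n → Spec_get_continued_fraction_period n (get_continued_fraction_period n)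

-- ===== LEMMAS AND PROOFS =====

-- The pure one-step map on states (m, d) of the loop body, the state after k
-- iterations, and the "reduced state" invariant used by the proofs.
def pvStep (n a0 : Int) (p : Int × Int) : Int × Int :=
  let m1 := p.2 * PySem.Int.floordiv (a0 + p.1) p.2 - p.1
  (m1, PySem.Int.floordiv (n - m1 * m1) p.2)
def pvS (n a0 : Int) (k : Nat) : Int × Int := (pvStep n a0)^[k] (0, 1)
def pvR (n a0 m d : Int) : Prop :=
  1 ≤ m ∧ m ≤ a0 ∧ 1 ≤ d ∧ d ∣ (n - m * m) ∧ a0 + 1 ≤ m + d ∧ d ≤ a0 + m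

-- B's mod-based update computes the same new m as A's floordiv-based one
lemma pvModStep (a0 m d : Int) :
    a0 - PySem.Int.mod (a0 + m) d = d * PySem.Int.floordiv (a0 + m) d - m := by
  have h := PySem.Int.floordiv_mul_add_mod (a0 + m) d
  linarith

set_option maxHeartbeats 1000000 in
lemma pvStep_main (n a0 m d : Int) (h1 : 1 ≤ a0) (hlt : a0 * a0 < n)
    (hub : n < (a0 + 1) * (a0 + 1)) (hR : pvR n a0 m d) :
    pvR n a0 (pvStep n a0 (m, d)).1 (pvStep n a0 (m, d)).2 ∧
      d * (pvStep n a0 (m, d)).2 = n - (pvStep n a0 (m, d)).1 * (pvStep n a0 (m, d)).1 := by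
  obtain ⟨hm1, hma0, hd1, hdvd, hsum, hdle⟩ := hR
  have hd0 : (0:Int) < d := by omega
  set q := PySem.Int.floordiv (a0 + m) d with hqdef
  set r := PySem.Int.mod (a0 + m) d with hrdef
  have hqr : q * d + r = a0 + m := PySem.Int.floordiv_mul_add_mod _ _
  have hr0 : 0 ≤ r := by rw [hrdef, PySem.Int.mod_eq_emod_of_pos hd0]; exact Int.emod_nonneg _ (by omega)
  have hrd : r < d := by rw [hrdef, PySem.Int.mod_eq_emod_of_pos hd0]; exact Int.emod_lt_of_pos _ hd0
  have hq1 : 1 ≤ q := by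
    by_contra hq; push_neg at hq
    nlinarith [mul_le_mul_of_nonneg_right (show q ≤ 0 by omega) (show (0:Int) ≤ d by omega)]
  have hcm : d * q = q * d := mul_comm d q
  have hdq : d ≤ d * q := le_mul_of_one_le_right (by omega) hq1
  have hstep : pvStep n a0 (m, d) = (d * q - m, PySem.Int.floordiv (n - (d * q - m) * (d * q - m)) d) := by
    simp only [pvStep]; rw [← hqdef]
  set m1 := d * q - m with hm1def
  have hm1r : m1 = a0 - r := by omega
  have hm1a : m1 ≤ a0 := by omega
  have hm1s : a0 + 1 ≤ m1 + d := by omega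
  have hm11 : 1 ≤ m1 := by omega
  have hm1ge : d - a0 ≤ m1 := by omega
  obtain ⟨c, hc⟩ := hdvd
  have hdvd1 : d ∣ n - m1 * m1 := ⟨c + 2 * q * m - d * q * q, by linear_combination hc⟩
  set d2 := PySem.Int.floordiv (n - m1 * m1) d with hd2def
  have hexact : d * d2 = n - m1 * m1 := by
    rw [hd2def, PySem.Int.floordiv_eq_ediv_of_pos hd0]
    exact Int.mul_ediv_cancel' hdvd1
  have hm1sq : m1 * m1 < n := by nlinarith [mul_self_le_mul_self (show (0:Int) ≤ m1 by omega) hm1a]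
  have hd21 : 1 ≤ d2 := by
    by_contra h2; push_neg at h2
    nlinarith [mul_le_mul_of_nonneg_left (show d2 ≤ 0 by omega) (show (0:Int) ≤ d by omega)]
  have hnub : n < (m1 + d) * (m1 + d) := by
    nlinarith [mul_le_mul hm1s hm1s (by omega : (0:Int) ≤ a0 + 1) (by omega : (0:Int) ≤ m1 + d)]
  have hd2lt : d2 < 2 * m1 + d := by
    have h3 : d * d2 < d * (2 * m1 + d) := by nlinarith
    exact lt_of_mul_lt_mul_left h3 (by omega)
  have hd2le : d2 ≤ a0 + m1 := by
    by_contra h4; push_neg at h4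
    have e1 : d2 * (d2 - 2 * m1) ≤ d2 * d := mul_le_mul_of_nonneg_left (by omega) (by omega)
    have e2 : (a0 + 1) * (a0 + 1) ≤ (d2 - m1) * (d2 - m1) :=
      mul_le_mul (by omega) (by omega) (by omega) (by omega)
    nlinarith [hexact, e1, e2, hub]
  have hdm1 : (d - m1) * (d - m1) < n := by
    have e0 : 0 ≤ (a0 - (d - m1)) * (a0 + (d - m1)) :=
      mul_nonneg (by linarith [hm1ge]) (by linarith [hm1a])
    nlinarith [e0]
  have hdlt : d < 2 * m1 + d2 := by
    have h6 : d * (d - 2 * m1) < d * d2 := by nlinarith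
    nlinarith [lt_of_mul_lt_mul_left h6 (show (0:Int) ≤ d by omega)]
  have hnlb : n < (m1 + d2) * (m1 + d2) := by
    nlinarith [mul_lt_mul_of_pos_right hdlt (show (0:Int) < d2 by omega), hexact]
  have hsum2 : a0 + 1 ≤ m1 + d2 := by
    by_contra h7; push_neg at h7
    have h8 : (m1 + d2) * (m1 + d2) ≤ a0 * a0 :=
      mul_le_mul (by omega) (by omega) (by omega) (by omega)
    linarith
  have hfst : (pvStep n a0 (m, d)).1 = m1 := by rw [hstep]
  have hsnd : (pvStep n a0 (m, d)).2 = d2 := by rw [hstep]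
  have hdvd2 : d2 ∣ n - m1 * m1 := ⟨d, by rw [← hexact]; ring⟩
  rw [hfst, hsnd]
  exact ⟨⟨hm11, hm1a, hd21, hdvd2, hsum2, hd2le⟩, hexact⟩

lemma pvFdiv_one (x : Int) : PySem.Int.floordiv x 1 = x := by
  rw [PySem.Int.floordiv_eq_ediv_of_pos (by norm_num)]; exact Int.ediv_one x

lemma pvMod_one (x : Int) : PySem.Int.mod x 1 = 0 := by
  rw [PySem.Int.mod_eq_emod_of_pos (by norm_num)]; exact Int.emod_one x

lemma pvStep_fst (n a0 m d : Int) : (pvStep n a0 (m, d)).1 = a0 + m - PySem.Int.mod (a0 + m) d - m := by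
  have h := PySem.Int.floordiv_mul_add_mod (a0 + m) d
  simp only [pvStep]
  linear_combination h

lemma pvStep_inj (n a0 : Int) (h1 : 1 ≤ a0) (hlt : a0 * a0 < n)
    (hub : n < (a0 + 1) * (a0 + 1)) {m d m' d' : Int}
    (hR : pvR n a0 m d) (hR' : pvR n a0 m' d')
    (heq : pvStep n a0 (m, d) = pvStep n a0 (m', d')) : m = m' ∧ d = d' := by
  have main := pvStep_main n a0 m d h1 hlt hub hR
  have main' := pvStep_main n a0 m' d' h1 hlt hub hR'
  have hd2 : 1 ≤ (pvStep n a0 (m, d)).2 := main.1.2.2.1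
  have hdd : d = d' := by
    have e1 := main.2
    have e2 := main'.2
    rw [← heq] at e2
    have e3 : d * (pvStep n a0 (m, d)).2 = d' * (pvStep n a0 (m, d)).2 := e1.trans e2.symm
    exact mul_right_cancel₀ (show (pvStep n a0 (m, d)).2 ≠ 0 by omega) e3
  subst hdd
  have hfst := pvStep_fst n a0 m d
  have hfst' := pvStep_fst n a0 m' d
  rw [← heq] at hfst'
  have hq := PySem.Int.floordiv_mul_add_mod (a0 + m) d
  have hq' := PySem.Int.floordiv_mul_add_mod (a0 + m') d
  set q := PySem.Int.floordiv (a0 + m) d with hqd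
  set q' := PySem.Int.floordiv (a0 + m') d with hqd'
  have hr : PySem.Int.mod (a0 + m) d = PySem.Int.mod (a0 + m') d := by omega
  have hmm : m - m' = (q - q') * d := by
    rw [hr] at hq; linear_combination hq' - hq
  obtain ⟨hm1, hma0, hd1, hdvd, hsum, hdle⟩ := hR
  obtain ⟨hm1', hma0', hd1', hdvd', hsum', hdle'⟩ := hR'
  have hlo : -d < m - m' := by linarith [hsum, hma0']
  have hhi : m - m' < d := by linarith [hsum', hma0]
  have hqq : q = q' := by
    rcases lt_trichotomy q q' with h | h | h
    · have := mul_le_mul_of_nonneg_right (show q - q' ≤ -1 by omega) (show (0:Int) ≤ d by omega)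
      nlinarith
    · exact h
    · have := mul_le_mul_of_nonneg_right (show 1 ≤ q - q' by omega) (show (0:Int) ≤ d by omega)
      nlinarith
  refine ⟨?_, rfl⟩
  rw [hqq] at hmm
  simp at hmm
  omega

lemma pvAval (n a0 m d : Int) (h1 : 1 ≤ a0) (hR : pvR n a0 m d) :
    PySem.Int.floordiv (a0 + m) d = 2 * a0 ↔ m = a0 ∧ d = 1 := by
  obtain ⟨hm1, hma0, hd1, hdvd, hsum, hdle⟩ := hR
  constructor
  · intro h
    have hqr := PySem.Int.floordiv_mul_add_mod (a0 + m) d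
    rw [h] at hqr
    have hr0 : 0 ≤ PySem.Int.mod (a0 + m) d := by
      rw [PySem.Int.mod_eq_emod_of_pos (by omega)]; exact Int.emod_nonneg _ (by omega)
    have hrd : PySem.Int.mod (a0 + m) d < d := by
      rw [PySem.Int.mod_eq_emod_of_pos (by omega)]; exact Int.emod_lt_of_pos _ (by omega)
    have hdone : d = 1 := by
      by_contra hd2
      have h2 : 2 ≤ d := by omega
      have := mul_le_mul_of_nonneg_left h2 (show (0:Int) ≤ 2 * a0 by omega)
      nlinarith
    rw [hdone] at hqr
    constructor
    · nlinarith
    · exact hdone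
  · rintro ⟨rfl, rfl⟩
    rw [pvFdiv_one]; ring

lemma pvS_one (n a0 : Int) : pvS n a0 1 = (a0, n - a0 * a0) := by
  show pvStep n a0 (0, 1) = _
  simp [pvStep]

lemma pvStep_a01 (n a0 : Int) : pvStep n a0 (a0, 1) = (a0, n - a0 * a0) := by
  simp only [pvStep, pvFdiv_one]
  norm_num

lemma pvS_succ (n a0 : Int) (k : Nat) : pvS n a0 (k + 1) = pvStep n a0 (pvS n a0 k) := by
  unfold pvS
  rw [Function.iterate_succ_apply']

lemma pvR_init (n a0 : Int) (h1 : 1 ≤ a0) (hlt : a0 * a0 < n)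
    (hub : n < (a0 + 1) * (a0 + 1)) : pvR n a0 a0 (n - a0 * a0) :=
  ⟨h1, le_refl _, by nlinarith, dvd_refl _, by nlinarith, by nlinarith⟩

lemma pvR_a01 (n a0 : Int) (h1 : 1 ≤ a0) : pvR n a0 a0 1 :=
  ⟨h1, le_refl _, le_refl _, one_dvd _, by omega, by omega⟩

lemma pvR_s (n a0 : Int) (h1 : 1 ≤ a0) (hlt : a0 * a0 < n)
    (hub : n < (a0 + 1) * (a0 + 1)) :
    ∀ k : Nat, 1 ≤ k → pvR n a0 (pvS n a0 k).1 (pvS n a0 k).2 := by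
  intro k hk
  induction k with
  | zero => omega
  | succ k ih =>
    rcases Nat.eq_or_lt_of_le hk with h | h
    · rw [← h, pvS_one]
      exact pvR_init n a0 h1 hlt hub
    · have hk1 : 1 ≤ k := by omega
      have := ih hk1
      rw [pvS_succ, ← Prod.mk.eta (p := pvS n a0 k)]
      exact (pvStep_main n a0 _ _ h1 hlt hub this).1

lemma pvStep_inj' (n a0 : Int) (h1 : 1 ≤ a0) (hlt : a0 * a0 < n)
    (hub : n < (a0 + 1) * (a0 + 1)) {p p' : Int × Int}
    (hR : pvR n a0 p.1 p.2) (hR' : pvR n a0 p'.1 p'.2)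
    (heq : pvStep n a0 p = pvStep n a0 p') : p = p' := by
  obtain ⟨m, d⟩ := p; obtain ⟨m', d'⟩ := p'
  obtain ⟨e1, e2⟩ := pvStep_inj n a0 h1 hlt hub hR hR' heq
  exact Prod.ext e1 e2

-- the next state computed by A's loop body is pvS (k+1), and
-- A's stop test (next state already seen) ↔ B's stop test ((m, d) = (a0, 1))
lemma pvCond (n a0 : Int) (h1 : 1 ≤ a0) (hlt : a0 * a0 < n) (hub : n < (a0 + 1) * (a0 + 1))
    (k : Nat) (m d : Int) (seen : PySem.Dict (Int × Int) Int)
    (hk : 1 ≤ k) (hs : (m, d) = pvS n a0 k)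
    (hseen : ∀ st : Int × Int, seen.contains st = true ↔ ∃ j : Nat, 1 ≤ j ∧ j ≤ k ∧ st = pvS n a0 j)
    (hinj : ∀ i j : Nat, 1 ≤ i → i ≤ k → 1 ≤ j → j ≤ k → pvS n a0 i = pvS n a0 j → i = j) :
    (d * PySem.Int.floordiv (a0 + m) d - m,
      PySem.Int.floordiv (n - (d * PySem.Int.floordiv (a0 + m) d - m) * (d * PySem.Int.floordiv (a0 + m) d - m)) d)
        = pvS n a0 (k + 1) ∧
    (seen.contains (d * PySem.Int.floordiv (a0 + m) d - m,
      PySem.Int.floordiv (n - (d * PySem.Int.floordiv (a0 + m) d - m) * (d * PySem.Int.floordiv (a0 + m) d - m)) d) = true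
        ↔ (m = a0 ∧ d = 1)) := by
  have hRk : pvR n a0 m d := by
    have h := pvR_s n a0 h1 hlt hub k hk
    rw [← hs] at h; exact h
  have hpair : (d * PySem.Int.floordiv (a0 + m) d - m,
      PySem.Int.floordiv (n - (d * PySem.Int.floordiv (a0 + m) d - m) * (d * PySem.Int.floordiv (a0 + m) d - m)) d)
        = pvS n a0 (k + 1) := by
    rw [pvS_succ, ← hs]; rfl
  refine ⟨hpair, ⟨?_, ?_⟩⟩
  · intro hc
    obtain ⟨j, hj1, hjk, hj⟩ := (hseen _).mp hc
    rw [hpair] at hj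
    rcases Nat.lt_or_ge j 2 with hj2 | hj2
    · -- j = 1 : pvS (k+1) = pvS 1 = pvStep (a0, 1), so pvS k = (a0, 1)
      have hj1' : j = 1 := by omega
      subst hj1'
      have hstep_eq : pvStep n a0 (pvS n a0 k) = pvStep n a0 (a0, 1) := by
        rw [← pvS_succ, hj, pvS_one, pvStep_a01]
      have hk_eq : pvS n a0 k = (a0, 1) :=
        pvStep_inj' n a0 h1 hlt hub (pvR_s n a0 h1 hlt hub k hk)
          (by simpa using pvR_a01 n a0 h1) hstep_eq
      rw [← hs] at hk_eq
      simp only [Prod.mk.injEq] at hk_eq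
      exact hk_eq
    · -- j ≥ 2 is impossible
      exfalso
      have hj1e : j - 1 + 1 = j := by omega
      have h4 : pvS n a0 j = pvStep n a0 (pvS n a0 (j - 1)) := by
        conv_lhs => rw [← hj1e]
        exact pvS_succ n a0 (j - 1)
      have hstep_eq : pvStep n a0 (pvS n a0 k) = pvStep n a0 (pvS n a0 (j - 1)) := by
        rw [← pvS_succ, hj, h4]
      have hk_eq : pvS n a0 k = pvS n a0 (j - 1) :=
        pvStep_inj' n a0 h1 hlt hub (pvR_s n a0 h1 hlt hub k hk)
          (pvR_s n a0 h1 hlt hub (j - 1) (by omega)) hstep_eq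
      have := hinj k (j - 1) hk (le_refl k) (by omega) (by omega) hk_eq
      omega
  · intro hc
    have hma : PySem.Int.floordiv (a0 + m) d = 2 * a0 := (pvAval n a0 m d h1 hRk).mpr hc
    have h2 : pvS n a0 (k + 1) = pvS n a0 1 := by
      rw [pvS_succ, ← hs, hc.1, hc.2, pvStep_a01, pvS_one]
    exact (hseen _).mpr ⟨1, le_refl 1, hk, by rw [hpair]; exact h2⟩

lemma pvGoA_succ (n a0 : Int) (fuel : Nat) (m d a : Int) (seen : PySem.Dict (Int × Int) Int) (period : Int) :
    pvGoA n a0 (fuel + 1) m d a seen period =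
      if seen.contains (d * a - m, PySem.Int.floordiv (n - (d * a - m) * (d * a - m)) d) then period
      else pvGoA n a0 fuel (d * a - m) (PySem.Int.floordiv (n - (d * a - m) * (d * a - m)) d)
        (PySem.Int.floordiv (a0 + (d * a - m)) (PySem.Int.floordiv (n - (d * a - m) * (d * a - m)) d))
        (seen.insert (d * a - m, PySem.Int.floordiv (n - (d * a - m) * (d * a - m)) d) period)
        (period + 1) := rfl

lemma pvGoA_zero (n a0 : Int) (m d a : Int) (seen : PySem.Dict (Int × Int) Int) (period : Int) :
    pvGoA n a0 0 m d a seen period = 0 := rfl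

lemma pvGoB_zero (n a0 : Int) (m d period : Int) :
    pvGoB n a0 0 m d period = if m = a0 ∧ d = 1 then period else 0 := by
  rw [pvGoB]

lemma pvGoB_succ (n a0 : Int) (fuel : Nat) (m d period : Int) :
    pvGoB n a0 (fuel + 1) m d period =
      if m = a0 ∧ d = 1 then period
      else pvGoB n a0 fuel (a0 - PySem.Int.mod (a0 + m) d)
        (PySem.Int.floordiv (n - (a0 - PySem.Int.mod (a0 + m) d) * (a0 - PySem.Int.mod (a0 + m) d)) d)
        (period + 1) := by
  rw [pvGoB]

lemma pvLockstep (n a0 : Int) (h1 : 1 ≤ a0) (hlt : a0 * a0 < n)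
    (hub : n < (a0 + 1) * (a0 + 1)) :
    ∀ (F k : Nat) (m d a period : Int) (seen : PySem.Dict (Int × Int) Int),
      1 ≤ k →
      (m, d) = pvS n a0 k →
      a = PySem.Int.floordiv (a0 + m) d →
      period = (k : Int) →
      (∀ st : Int × Int, seen.contains st = true ↔ ∃ j : Nat, 1 ≤ j ∧ j ≤ k ∧ st = pvS n a0 j) →
      (∀ i j : Nat, 1 ≤ i → i ≤ k → 1 ≤ j → j ≤ k → pvS n a0 i = pvS n a0 j → i = j) →
      pvGoA n a0 (F + 1) m d a seen period = pvGoB n a0 F m d period := by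
  intro F
  induction F with
  | zero =>
    intro k m d a period seen hk hs ha hp hseen hinj
    subst ha; subst hp
    obtain ⟨hpair, hcond⟩ := pvCond n a0 h1 hlt hub k m d seen hk hs hseen hinj
    rw [pvGoA_succ, pvGoB_zero]
    by_cases hc : m = a0 ∧ d = 1
    · rw [if_pos (hcond.mpr hc), if_pos hc]
    · have hcf : ¬ seen.contains (d * PySem.Int.floordiv (a0 + m) d - m,
        PySem.Int.floordiv (n - (d * PySem.Int.floordiv (a0 + m) d - m) * (d * PySem.Int.floordiv (a0 + m) d - m)) d) = true :=
        fun h => hc (hcond.mp h)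
      rw [if_neg hcf, if_neg hc, pvGoA_zero]
  | succ F ih =>
    intro k m d a period seen hk hs ha hp hseen hinj
    subst ha; subst hp
    obtain ⟨hpair, hcond⟩ := pvCond n a0 h1 hlt hub k m d seen hk hs hseen hinj
    rw [pvGoA_succ, pvGoB_succ]
    by_cases hc : m = a0 ∧ d = 1
    · rw [if_pos (hcond.mpr hc), if_pos hc]
    · have hcf : ¬ seen.contains (d * PySem.Int.floordiv (a0 + m) d - m,
        PySem.Int.floordiv (n - (d * PySem.Int.floordiv (a0 + m) d - m) * (d * PySem.Int.floordiv (a0 + m) d - m)) d) = true :=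
        fun h => hc (hcond.mp h)
      rw [if_neg hcf, if_neg hc, pvModStep]
      apply ih (k + 1) _ _ _ _ _ (by omega) hpair rfl (by push_cast; ring)
      · -- seen invariant after insert
        intro st
        rw [PySem.Dict.contains_insert]
        simp only [Bool.or_eq_true, beq_iff_eq]
        constructor
        · rintro (h | h)
          · exact ⟨k + 1, by omega, le_refl _, by rw [h, hpair]⟩
          · obtain ⟨j, hj1, hjk, hj⟩ := (hseen st).mp h
            exact ⟨j, hj1, by omega, hj⟩
        · rintro ⟨j, hj1, hjk, hj⟩
          rcases Nat.eq_or_lt_of_le hjk with hj2 | hj2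
          · left; rw [hj, hj2, ← hpair]
          · right; exact (hseen st).mpr ⟨j, hj1, by omega, hj⟩
      · -- injectivity up to k+1
        intro i j hi1 hik hj1 hjk hij
        rcases Nat.eq_or_lt_of_le hik with hi2 | hi2 <;> rcases Nat.eq_or_lt_of_le hjk with hj2 | hj2
        · omega
        · exfalso
          apply hcf
          apply (hseen _).mpr
          refine ⟨j, hj1, by omega, ?_⟩
          rw [hpair, ← hij, hi2]
        · exfalso
          apply hcf
          apply (hseen _).mpr
          refine ⟨i, hi1, by omega, ?_⟩
          rw [hpair, hij, hj2]
        · exact hinj i j hi1 (by omega) hj1 (by omega) hij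


-- ===== VERDICT (by name: the statement is the Claim_ definition above) =====
theorem get_continued_fraction_period_spec : Claim_equal_get_continued_fraction_period := by
  intro n _ hpre
  show get_continued_fraction_period n = get_continued_fraction_period_alt n
  simp only [get_continued_fraction_period, get_continued_fraction_period_alt]
  have hle : Int.sqrt n * Int.sqrt n ≤ n := by
    conv_rhs => rw [← Int.toNat_of_nonneg hpre]
    rw [Int.sqrt]
    have h := Nat.sqrt_le' n.toNat
    rw [pow_two] at h
    exact_mod_cast h
  have hub : n < (Int.sqrt n + 1) * (Int.sqrt n + 1) := by
    conv_lhs => rw [← Int.toNat_of_nonneg hpre]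
    rw [Int.sqrt]
    have h := Nat.lt_succ_sqrt' n.toNat
    rw [pow_two, Nat.succ_eq_add_one] at h
    exact_mod_cast h
  set a0 := Int.sqrt n with ha0
  by_cases hsq : a0 * a0 = n
  · rw [if_pos hsq, if_pos hsq]
  · rw [if_neg hsq, if_neg hsq]
    have hlt : a0 * a0 < n := lt_of_le_of_ne hle hsq
    have h0 : 0 ≤ a0 := Int.sqrt_nonneg n
    have h1 : 1 ≤ a0 := by
      rcases eq_or_lt_of_le h0 with h | h
      · exfalso; rw [← h] at hlt hub; norm_num at hlt hub; omega
      · omega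
    set N := (n.toNat + 2) * (n.toNat + 2) with hN
    have hN0 : 0 < N := Nat.mul_pos (by omega) (by omega)
    obtain ⟨N', hN'⟩ : ∃ N', N = N' + 1 := ⟨N - 1, by omega⟩
    rw [pvGoA_succ, hN', pvGoB_succ]
    have e1 : (1 : Int) * a0 - 0 = a0 := by ring
    have hcf : ¬ (PySem.Dict.empty : PySem.Dict (Int × Int) Int).contains
        (1 * a0 - 0, PySem.Int.floordiv (n - (1 * a0 - 0) * (1 * a0 - 0)) 1) = true := by
      rw [PySem.Dict.contains_empty]; simp
    rw [if_neg hcf, if_neg (show ¬ ((0:Int) = a0 ∧ (1:Int) = 1) by simp; omega)]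
    have e2 : a0 - PySem.Int.mod (a0 + 0) 1 = a0 := by rw [pvMod_one]; ring
    rw [e1, pvFdiv_one, e2, pvFdiv_one]
    have hs1 : ((a0 : Int), n - a0 * a0) = pvS n a0 1 := (pvS_one n a0).symm
    apply pvLockstep n a0 h1 hlt hub N' 1 _ _ _ _ _ (le_refl 1) hs1 rfl (by norm_num)
    · intro st
      rw [PySem.Dict.contains_insert]
      simp only [Bool.or_eq_true, beq_iff_eq, PySem.Dict.contains_empty, Bool.false_eq_true, or_false]
      constructor
      · intro h; exact ⟨1, le_refl 1, le_refl 1, by rw [h, ← pvS_one]⟩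
      · rintro ⟨j, hj1, hjk, hj⟩
        have : j = 1 := by omega
        rw [hj, this, pvS_one]
    · intro i j hi1 hik hj1 hjk _; omega
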